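-- pv_equiv track=rewrite | github.com/LorenaPujante/MimicIII_BDOG_Benchmark | runTests_vm9.py | getArrayQueries
-- ===== SOURCE A (Python) =====
-- queryNames = ['1', '2', '2p', '3', '4', '4p', '5', '6', '6m']
--
-- def getArrayQueries(db):
--     arrayQueries = []
--     for i in range(len(queryNames)):
--         qName = queryNames[i]
--
--         if qName == "1":
--             arrayQueries.append([])
--             arrayQueries[i].append(db + " " + qName + " 2004-01-01T00:00:00 2004-01-31T00:00:00 80155 7")
--             arrayQueries[i].append(db + " " + qName + " 2004-02-01T00:00:00 2004-02-29T00:00:00 80155 7")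
--             arrayQueries[i].append(db + " " + qName + " 2004-03-01T00:00:00 2004-03-31T00:00:00 80075 7")
--             arrayQueries[i].append(db + " " + qName + " 2004-04-01T00:00:00 2004-04-30T00:00:00 80155 7")
--             arrayQueries[i].append(db + " " + qName + " 2004-05-01T00:00:00 2004-05-31T00:00:00 80053 7")
--             arrayQueries[i].append(db + " " + qName + " 2004-06-01T00:00:00 2004-06-30T00:00:00 80002 7")
--             arrayQueries[i].append(db + " " + qName + " 2004-07-01T00:00:00 2004-07-31T00:00:00 80053 7")
--             arrayQueries[i].append(db + " " + qName + " 2004-08-01T00:00:00 2004-08-31T00:00:00 80053 7")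
--             arrayQueries[i].append(db + " " + qName + " 2004-09-01T00:00:00 2004-09-30T00:00:00 80023 7")
--             arrayQueries[i].append(db + " " + qName + " 2004-10-01T00:00:00 2004-10-31T00:00:00 80023 7")
--             arrayQueries[i].append(db + " " + qName + " 2004-11-01T00:00:00 2004-11-30T00:00:00 80155 7")
--             arrayQueries[i].append(db + " " + qName + " 2004-12-01T00:00:00 2004-12-31T00:00:00 80155 7")
--
--         if qName == "2"  or  qName == "2p":
--             arrayQueries.append([])
--             arrayQueries[i].append(db + " " + qName + " 2004-01-01T00:00:00 2004-01-31T00:00:00 80155 72775")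
--             arrayQueries[i].append(db + " " + qName + " 2004-02-01T00:00:00 2004-02-29T00:00:00 80155 78708")
--             arrayQueries[i].append(db + " " + qName + " 2004-03-01T00:00:00 2004-03-31T00:00:00 80075 76698")
--             arrayQueries[i].append(db + " " + qName + " 2004-04-01T00:00:00 2004-04-30T00:00:00 80155 51060")
--             arrayQueries[i].append(db + " " + qName + " 2004-05-01T00:00:00 2004-05-31T00:00:00 80053 5056")
--             arrayQueries[i].append(db + " " + qName + " 2004-06-01T00:00:00 2004-06-30T00:00:00 80002 2115")
--             arrayQueries[i].append(db + " " + qName + " 2004-07-01T00:00:00 2004-07-31T00:00:00 80053 17344")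
--             arrayQueries[i].append(db + " " + qName + " 2004-08-01T00:00:00 2004-08-31T00:00:00 80053 15728")
--             arrayQueries[i].append(db + " " + qName + " 2004-09-01T00:00:00 2004-09-30T00:00:00 80023 19220")
--             arrayQueries[i].append(db + " " + qName + " 2004-10-01T00:00:00 2004-10-31T00:00:00 80023 22332")
--             arrayQueries[i].append(db + " " + qName + " 2004-11-01T00:00:00 2004-11-30T00:00:00 80155 88065")
--             arrayQueries[i].append(db + " " + qName + " 2004-12-01T00:00:00 2004-12-31T00:00:00 80155 24747")
--
--         if qName == "3":
--             arrayQueries.append([])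
--             arrayQueries[i].append(db + " " + qName + " 2004-01-01T00:00:00 2004-01-31T00:00:00 26685 12419 75838")
--             arrayQueries[i].append(db + " " + qName + " 2004-02-01T00:00:00 2004-02-29T00:00:00 67924 53541 7487")
--             arrayQueries[i].append(db + " " + qName + " 2004-03-01T00:00:00 2004-03-31T00:00:00 19496 24991 70990")
--             arrayQueries[i].append(db + " " + qName + " 2004-04-01T00:00:00 2004-04-30T00:00:00 88078 24896 24588")
--             arrayQueries[i].append(db + " " + qName + " 2004-05-01T00:00:00 2004-05-31T00:00:00 73536 77733 11765")
--             arrayQueries[i].append(db + " " + qName + " 2004-06-01T00:00:00 2004-06-30T00:00:00 86903 25225 64897")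
--             arrayQueries[i].append(db + " " + qName + " 2004-07-01T00:00:00 2004-07-31T00:00:00 5399 13807 90158")
--             arrayQueries[i].append(db + " " + qName + " 2004-08-01T00:00:00 2004-08-31T00:00:00 493 4640 24711")
--             arrayQueries[i].append(db + " " + qName + " 2004-09-01T00:00:00 2004-09-30T00:00:00 57288 59979 1866")
--             arrayQueries[i].append(db + " " + qName + " 2004-10-01T00:00:00 2004-10-31T00:00:00 64160 89634 3465")
--             arrayQueries[i].append(db + " " + qName + " 2004-11-01T00:00:00 2004-11-30T00:00:00 12990 27659 44434")
--             arrayQueries[i].append(db + " " + qName + " 2004-12-01T00:00:00 2004-12-31T00:00:00 94484 13813 96575")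
--             '''arrayQueries[i].append(db + " " + qName + " 2004-01-01T00:00:00 2004-01-31T00:00:00 26685 6066 59260 12419 82605 23464 75838 59421 9819")
--             arrayQueries[i].append(db + " " + qName + " 2004-02-01T00:00:00 2004-02-29T00:00:00 67924 71760 98468 53541 62933 14716 7487 5206 27173")
--             arrayQueries[i].append(db + " " + qName + " 2004-03-01T00:00:00 2004-03-31T00:00:00 19496 66508 15524 24991 17146 12585 70990 2941 29989")
--             arrayQueries[i].append(db + " " + qName + " 2004-04-01T00:00:00 2004-04-30T00:00:00 88078 94404 20330 24896 27766 52482 24588 11813 66389")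
--             arrayQueries[i].append(db + " " + qName + " 2004-05-01T00:00:00 2004-05-31T00:00:00 73536 10019 12412 77733 69328 24892 11765 26539 20019")
--             arrayQueries[i].append(db + " " + qName + " 2004-06-01T00:00:00 2004-06-30T00:00:00 86903 91398 4596 25225 12776 65951 64897 80454 88634")
--             arrayQueries[i].append(db + " " + qName + " 2004-07-01T00:00:00 2004-07-31T00:00:00 5399 172 83663 13807 5125 3351 90158 4479 21083")
--             arrayQueries[i].append(db + " " + qName + " 2004-08-01T00:00:00 2004-08-31T00:00:00 493 28721 31514 4640 67906 45495 24711 62380 76710")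
--             arrayQueries[i].append(db + " " + qName + " 2004-09-01T00:00:00 2004-09-30T00:00:00 57288 70929 31851 59979 30580 81025 1866 85769 56769")
--             arrayQueries[i].append(db + " " + qName + " 2004-10-01T00:00:00 2004-10-31T00:00:00 64160 24634 9722 89634 24326 76561 3465 21420 29219")
--             arrayQueries[i].append(db + " " + qName + " 2004-11-01T00:00:00 2004-11-30T00:00:00 12990 19473 98939 27659 43484 66637 44434 13521 15924")
--             arrayQueries[i].append(db + " " + qName + " 2004-12-01T00:00:00 2004-12-31T00:00:00 94484 10606 94915 13813 16817 19997 96575 28992 30826")'''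
--
--         if qName == "4"  or  qName == "4p":
--             arrayQueries.append([])
--             arrayQueries[i].append(db + " " + qName + " 2000-01-14T00:00:00 2000-01-30T00:00:00 31935 82642")
--
--         if qName == "5":
--             arrayQueries.append([])
--             arrayQueries[i].append(db + " " + qName + " 2000-01-14T00:00:00 2000-01-30T00:00:00 80155 5193 31935 82642 13181 21040")
--
--         if qName == "6"  or  qName == "6m":
--             arrayQueries.append([])
--             arrayQueries[i].append(db + " " + qName + " 2000-01-14T00:00:00 2000-01-30T00:00:00 3 0c 80155")
--
--     return arrayQueries
-- ===== SOURCE B (Python) =====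
-- queryNames = ['1', '2', '2p', '3', '4', '4p', '5', '6', '6m']
--
-- MONTHS = [
--     ("2004-01-01T00:00:00", "2004-01-31T00:00:00"),
--     ("2004-02-01T00:00:00", "2004-02-29T00:00:00"),
--     ("2004-03-01T00:00:00", "2004-03-31T00:00:00"),
--     ("2004-04-01T00:00:00", "2004-04-30T00:00:00"),
--     ("2004-05-01T00:00:00", "2004-05-31T00:00:00"),
--     ("2004-06-01T00:00:00", "2004-06-30T00:00:00"),
--     ("2004-07-01T00:00:00", "2004-07-31T00:00:00"),
--     ("2004-08-01T00:00:00", "2004-08-31T00:00:00"),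
--     ("2004-09-01T00:00:00", "2004-09-30T00:00:00"),
--     ("2004-10-01T00:00:00", "2004-10-31T00:00:00"),
--     ("2004-11-01T00:00:00", "2004-11-30T00:00:00"),
--     ("2004-12-01T00:00:00", "2004-12-31T00:00:00"),
-- ]
--
-- TAILS_1 = ["80155 7", "80155 7", "80075 7", "80155 7", "80053 7", "80002 7",
--            "80053 7", "80053 7", "80023 7", "80023 7", "80155 7", "80155 7"]
-- TAILS_2 = ["80155 72775", "80155 78708", "80075 76698", "80155 51060", "80053 5056",
--            "80002 2115", "80053 17344", "80053 15728", "80023 19220", "80023 22332",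
--            "80155 88065", "80155 24747"]
-- TAILS_3 = ["26685 12419 75838", "67924 53541 7487", "19496 24991 70990",
--            "88078 24896 24588", "73536 77733 11765", "86903 25225 64897",
--            "5399 13807 90158", "493 4640 24711", "57288 59979 1866",
--            "64160 89634 3465", "12990 27659 44434", "94484 13813 96575"]
--
-- MONTHLY_TAILS = {"1": TAILS_1, "2": TAILS_2, "2p": TAILS_2, "3": TAILS_3}
--
-- SINGLE_RANGE = ("2000-01-14T00:00:00", "2000-01-30T00:00:00")
-- SINGLE_TAILS = {"4": "31935 82642", "4p": "31935 82642",
--                 "5": "80155 5193 31935 82642 13181 21040",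
--                 "6": "3 0c 80155", "6m": "3 0c 80155"}
--
--
-- def getArrayQueries(db):
--     result = []
--     for qName in queryNames:
--         if qName in MONTHLY_TAILS:
--             rows = [db + " " + qName + " " + start + " " + end + " " + tail
--                     for (start, end), tail in zip(MONTHS, MONTHLY_TAILS[qName])]
--         else:
--             start, end = SINGLE_RANGE
--             rows = [db + " " + qName + " " + start + " " + end + " " + SINGLE_TAILS[qName]]
--         result.append(rows)
--     return result
-- ===== Notes on version B (the rewrite author's own statement) =====
-- stated objective: simpler
-- what changed: Replaced the 9-branch if-chain of ~40 hard-coded append statements by a shared 12-month date table plus per-query-name tail tables, zipped into rows in one uniform loop over queryNames.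
import Mathlib
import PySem

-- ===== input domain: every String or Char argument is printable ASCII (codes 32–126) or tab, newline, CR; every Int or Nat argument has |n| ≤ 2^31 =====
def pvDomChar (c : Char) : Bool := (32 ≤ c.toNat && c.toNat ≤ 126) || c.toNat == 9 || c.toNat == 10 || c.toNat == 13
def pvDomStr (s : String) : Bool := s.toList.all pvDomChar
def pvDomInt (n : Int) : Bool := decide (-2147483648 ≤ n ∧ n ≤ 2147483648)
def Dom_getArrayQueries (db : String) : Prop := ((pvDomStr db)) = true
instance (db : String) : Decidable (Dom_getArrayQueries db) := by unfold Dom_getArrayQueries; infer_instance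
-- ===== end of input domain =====

-- B replaces A's long if-chain of hard-coded append statements by a shared month table plus
-- per-name tail tables zipped together (objective: simpler). Return values proved equal.

-- ===== PORT A =====
def pyQueryNames : List String := ["1", "2", "2p", "3", "4", "4p", "5", "6", "6m"]

-- 'arrayQueries.append([])' followed by repeated 'arrayQueries[i].append(line)';
-- i is the nonnegative loop index, so indexing arrayQueries[i] is List.modify at i.toNat (exact here).
def pvAppendBlock (arr : List (List String)) (i : Int) (lines : List String) : List (List String) :=
  lines.foldl (fun a s => a.modify i.toNat (fun l => l ++ [s])) (arr ++ [[]])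

def getArrayQueries (db : String) : List (List String) :=
  (PySem.List.pyRange 0 (Int.ofNat pyQueryNames.length) 1).foldl (fun arr i =>
    let qName := (PySem.List.pyGet? pyQueryNames i).getD ""
    let arr := if qName = "1" then
      pvAppendBlock arr i
        [ db ++ " " ++ qName ++ " 2004-01-01T00:00:00 2004-01-31T00:00:00 80155 7"
        , db ++ " " ++ qName ++ " 2004-02-01T00:00:00 2004-02-29T00:00:00 80155 7"
        , db ++ " " ++ qName ++ " 2004-03-01T00:00:00 2004-03-31T00:00:00 80075 7"
        , db ++ " " ++ qName ++ " 2004-04-01T00:00:00 2004-04-30T00:00:00 80155 7"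
        , db ++ " " ++ qName ++ " 2004-05-01T00:00:00 2004-05-31T00:00:00 80053 7"
        , db ++ " " ++ qName ++ " 2004-06-01T00:00:00 2004-06-30T00:00:00 80002 7"
        , db ++ " " ++ qName ++ " 2004-07-01T00:00:00 2004-07-31T00:00:00 80053 7"
        , db ++ " " ++ qName ++ " 2004-08-01T00:00:00 2004-08-31T00:00:00 80053 7"
        , db ++ " " ++ qName ++ " 2004-09-01T00:00:00 2004-09-30T00:00:00 80023 7"
        , db ++ " " ++ qName ++ " 2004-10-01T00:00:00 2004-10-31T00:00:00 80023 7"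
        , db ++ " " ++ qName ++ " 2004-11-01T00:00:00 2004-11-30T00:00:00 80155 7"
        , db ++ " " ++ qName ++ " 2004-12-01T00:00:00 2004-12-31T00:00:00 80155 7" ]
      else arr
    let arr := if qName = "2" ∨ qName = "2p" then
      pvAppendBlock arr i
        [ db ++ " " ++ qName ++ " 2004-01-01T00:00:00 2004-01-31T00:00:00 80155 72775"
        , db ++ " " ++ qName ++ " 2004-02-01T00:00:00 2004-02-29T00:00:00 80155 78708"
        , db ++ " " ++ qName ++ " 2004-03-01T00:00:00 2004-03-31T00:00:00 80075 76698"
        , db ++ " " ++ qName ++ " 2004-04-01T00:00:00 2004-04-30T00:00:00 80155 51060"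
        , db ++ " " ++ qName ++ " 2004-05-01T00:00:00 2004-05-31T00:00:00 80053 5056"
        , db ++ " " ++ qName ++ " 2004-06-01T00:00:00 2004-06-30T00:00:00 80002 2115"
        , db ++ " " ++ qName ++ " 2004-07-01T00:00:00 2004-07-31T00:00:00 80053 17344"
        , db ++ " " ++ qName ++ " 2004-08-01T00:00:00 2004-08-31T00:00:00 80053 15728"
        , db ++ " " ++ qName ++ " 2004-09-01T00:00:00 2004-09-30T00:00:00 80023 19220"
        , db ++ " " ++ qName ++ " 2004-10-01T00:00:00 2004-10-31T00:00:00 80023 22332"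
        , db ++ " " ++ qName ++ " 2004-11-01T00:00:00 2004-11-30T00:00:00 80155 88065"
        , db ++ " " ++ qName ++ " 2004-12-01T00:00:00 2004-12-31T00:00:00 80155 24747" ]
      else arr
    let arr := if qName = "3" then
      pvAppendBlock arr i
        [ db ++ " " ++ qName ++ " 2004-01-01T00:00:00 2004-01-31T00:00:00 26685 12419 75838"
        , db ++ " " ++ qName ++ " 2004-02-01T00:00:00 2004-02-29T00:00:00 67924 53541 7487"
        , db ++ " " ++ qName ++ " 2004-03-01T00:00:00 2004-03-31T00:00:00 19496 24991 70990"
        , db ++ " " ++ qName ++ " 2004-04-01T00:00:00 2004-04-30T00:00:00 88078 24896 24588"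
        , db ++ " " ++ qName ++ " 2004-05-01T00:00:00 2004-05-31T00:00:00 73536 77733 11765"
        , db ++ " " ++ qName ++ " 2004-06-01T00:00:00 2004-06-30T00:00:00 86903 25225 64897"
        , db ++ " " ++ qName ++ " 2004-07-01T00:00:00 2004-07-31T00:00:00 5399 13807 90158"
        , db ++ " " ++ qName ++ " 2004-08-01T00:00:00 2004-08-31T00:00:00 493 4640 24711"
        , db ++ " " ++ qName ++ " 2004-09-01T00:00:00 2004-09-30T00:00:00 57288 59979 1866"
        , db ++ " " ++ qName ++ " 2004-10-01T00:00:00 2004-10-31T00:00:00 64160 89634 3465"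
        , db ++ " " ++ qName ++ " 2004-11-01T00:00:00 2004-11-30T00:00:00 12990 27659 44434"
        , db ++ " " ++ qName ++ " 2004-12-01T00:00:00 2004-12-31T00:00:00 94484 13813 96575" ]
      else arr
    let arr := if qName = "4" ∨ qName = "4p" then
      pvAppendBlock arr i
        [ db ++ " " ++ qName ++ " 2000-01-14T00:00:00 2000-01-30T00:00:00 31935 82642" ]
      else arr
    let arr := if qName = "5" then
      pvAppendBlock arr i
        [ db ++ " " ++ qName ++ " 2000-01-14T00:00:00 2000-01-30T00:00:00 80155 5193 31935 82642 13181 21040" ]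
      else arr
    let arr := if qName = "6" ∨ qName = "6m" then
      pvAppendBlock arr i
        [ db ++ " " ++ qName ++ " 2000-01-14T00:00:00 2000-01-30T00:00:00 3 0c 80155" ]
      else arr
    arr) []

-- ===== PORT B =====
def pvMonths : List (String × String) :=
  [ ("2004-01-01T00:00:00", "2004-01-31T00:00:00")
  , ("2004-02-01T00:00:00", "2004-02-29T00:00:00")
  , ("2004-03-01T00:00:00", "2004-03-31T00:00:00")
  , ("2004-04-01T00:00:00", "2004-04-30T00:00:00")
  , ("2004-05-01T00:00:00", "2004-05-31T00:00:00")
  , ("2004-06-01T00:00:00", "2004-06-30T00:00:00")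
  , ("2004-07-01T00:00:00", "2004-07-31T00:00:00")
  , ("2004-08-01T00:00:00", "2004-08-31T00:00:00")
  , ("2004-09-01T00:00:00", "2004-09-30T00:00:00")
  , ("2004-10-01T00:00:00", "2004-10-31T00:00:00")
  , ("2004-11-01T00:00:00", "2004-11-30T00:00:00")
  , ("2004-12-01T00:00:00", "2004-12-31T00:00:00") ]

def pvTails1 : List String :=
  ["80155 7", "80155 7", "80075 7", "80155 7", "80053 7", "80002 7",
   "80053 7", "80053 7", "80023 7", "80023 7", "80155 7", "80155 7"]
def pvTails2 : List String :=
  ["80155 72775", "80155 78708", "80075 76698", "80155 51060", "80053 5056",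
   "80002 2115", "80053 17344", "80053 15728", "80023 19220", "80023 22332",
   "80155 88065", "80155 24747"]
def pvTails3 : List String :=
  ["26685 12419 75838", "67924 53541 7487", "19496 24991 70990",
   "88078 24896 24588", "73536 77733 11765", "86903 25225 64897",
   "5399 13807 90158", "493 4640 24711", "57288 59979 1866",
   "64160 89634 3465", "12990 27659 44434", "94484 13813 96575"]

def pvMonthlyTails : PySem.Dict String (List String) :=
  PySem.Dict.ofList [("1", pvTails1), ("2", pvTails2), ("2p", pvTails2), ("3", pvTails3)]

def pvSingleRange : String × String := ("2000-01-14T00:00:00", "2000-01-30T00:00:00")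

def pvSingleTails : PySem.Dict String String :=
  PySem.Dict.ofList [("4", "31935 82642"), ("4p", "31935 82642"),
   ("5", "80155 5193 31935 82642 13181 21040"),
   ("6", "3 0c 80155"), ("6m", "3 0c 80155")]

def getArrayQueries_alt (db : String) : List (List String) :=
  pyQueryNames.foldl (fun result qName =>
    let rows :=
      match PySem.Dict.get? pvMonthlyTails qName with
      | some tails =>
          (pvMonths.zip tails).map (fun p =>
            db ++ " " ++ qName ++ " " ++ p.1.1 ++ " " ++ p.1.2 ++ " " ++ p.2)
      | none =>
          [db ++ " " ++ qName ++ " " ++ pvSingleRange.1 ++ " " ++ pvSingleRange.2 ++ " "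
             ++ (PySem.Dict.get? pvSingleTails qName).getD ""]
    result ++ [rows]) []

-- ===== PRECONDITION & SPEC =====
def Spec_getArrayQueries (db : String) (out : List (List String)) : Prop := out = getArrayQueries_alt db
instance (db : String) (out : List (List String)) : Decidable (Spec_getArrayQueries db out) := by unfold Spec_getArrayQueries; infer_instance

-- ===== CLAIM (what is proved, stated in full; the proofs are below) =====
def Claim_equal_getArrayQueries : Prop := ∀ (db : String), Dom_getArrayQueries db → Spec_getArrayQueries db (getArrayQueries db)

-- ===== LEMMAS AND PROOFS =====

-- ===== VERDICT (by name: the statement is the Claim_ definition above) =====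
theorem getArrayQueries_spec : Claim_equal_getArrayQueries := by
  intro db _
  unfold Spec_getArrayQueries getArrayQueries getArrayQueries_alt
  have h : PySem.List.pyRange 0 (Int.ofNat pyQueryNames.length) 1 = [0, 1, 2, 3, 4, 5, 6, 7, 8] := by
    decide
  rw [h]
  simp [pyQueryNames, pvAppendBlock, pvMonths, pvTails1, pvTails2, pvTails3,
        pvMonthlyTails, pvSingleRange, pvSingleTails,
        PySem.List.pyGet?, PySem.List.pyIdx?, PySem.Dict.get?, PySem.Dict.ofList, PySem.Dict.empty, PySem.Dict.update, PySem.Dict.insert, List.find?, List.zip, List.zipWith, 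
        List.foldl, List.modify, String.append_assoc]
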